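-- pv_equiv track=rewrite | github.com/ConvoSphere/ConvoSphere | backend/app/services/assistants/assistant_tools.py | _filter_relevant_tools
-- ===== SOURCE A (Python) =====
-- from typing import Any
--
-- def _filter_relevant_tools(
--     user_message: str, available_tools: list[dict[str, Any]]
-- ) -> list[dict[str, Any]]:
--     """
--     Filter tools based on relevance to user message.
--
--     Args:
--         user_message: User message
--         available_tools: Available tools
--
--     Returns:
--         List[dict]: Relevant tools
--     """
--     user_message_lower = user_message.lower()
--     relevant_tools = []
--
--     # Define tool keywords for relevance matching
--     tool_keywords = {
--         "search": ["suchen", "finden", "recherchieren", "search", "find"],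
--         "calculator": ["berechnen", "rechnen", "calculate", "compute", "math"],
--         "file": ["datei", "file", "lesen", "read", "schreiben", "write"],
--         "api": ["api", "daten", "data", "abrufen", "fetch"],
--         "analysis": ["analysieren", "analyze", "auswerten", "evaluate"],
--     }
--
--     for tool in available_tools:
--         tool_name = tool.get("name", "").lower()
--         tool_description = tool.get("description", "").lower()
--         tool_category = tool.get("category", "").lower()
--
--         # Check if tool is relevant based on keywords
--         is_relevant = False
--
--         # Check tool name and description
--         for keywords in tool_keywords.values():
--             if any(
--                 keyword in tool_name or keyword in tool_description
--                 for keyword in keywords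
--             ) and any(keyword in user_message_lower for keyword in keywords):
--                 is_relevant = True
--                 break
--
--         # Check tool category
--         if tool_category in user_message_lower:
--             is_relevant = True
--
--         # Check for specific tool mentions
--         if tool_name in user_message_lower:
--             is_relevant = True
--
--         if is_relevant:
--             relevant_tools.append(tool)
--
--     # If no relevant tools found, return all tools (fallback)
--     if not relevant_tools:
--         relevant_tools = available_tools
--
--     return relevant_tools
-- ===== SOURCE B (Python) =====
-- from typing import Any
--
-- _TOOL_KEYWORD_GROUPS = [
--     ["suchen", "finden", "recherchieren", "search", "find"],
--     ["berechnen", "rechnen", "calculate", "compute", "math"],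
--     ["datei", "file", "lesen", "read", "schreiben", "write"],
--     ["api", "daten", "data", "abrufen", "fetch"],
--     ["analysieren", "analyze", "auswerten", "evaluate"],
-- ]
--
--
-- def _filter_relevant_tools(
--     user_message: str, available_tools: list[dict[str, Any]]
-- ) -> list[dict[str, Any]]:
--     msg = user_message.lower()
--
--     # Stage 1: dissolve the group structure.  A tool matches via the keyword
--     # table iff some keyword of some message-activated group occurs in its
--     # name or description, so a flat list of the activated groups' keywords
--     # carries exactly the same information as the nested group/keyword scan.
--     active_keywords = [
--         keyword
--         for group in _TOOL_KEYWORD_GROUPS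
--         if any(w in msg for w in group)
--         for keyword in group
--     ]
--
--     # Stage 2: compute one relevance flag per tool.
--     flags = []
--     for tool in available_tools:
--         name = tool.get("name", "").lower()
--         desc = tool.get("description", "").lower()
--         cat = tool.get("category", "").lower()
--         flags.append(
--             any(k in name or k in desc for k in active_keywords)
--             or cat in msg
--             or name in msg
--         )
--
--     # Stage 3: select the flagged tools, falling back to all tools.
--     relevant_tools = [tool for tool, flag in zip(available_tools, flags) if flag]
--     return relevant_tools if relevant_tools else available_tools
-- ===== Notes on version B (the rewrite author's own statement) =====
-- stated objective: alternative
-- what changed: B dissolves the keyword-group structure: it flattens the message-activated groups into one flat keyword list once (correct because a tool matches iff some keyword of some activated group hits its name/description), then computes a per-tool flag list in a second pass and zip-selects the flagged tools, instead of A's per-tool nested group loop with a mutable flag, break and overriding if-statements.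
import Mathlib
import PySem

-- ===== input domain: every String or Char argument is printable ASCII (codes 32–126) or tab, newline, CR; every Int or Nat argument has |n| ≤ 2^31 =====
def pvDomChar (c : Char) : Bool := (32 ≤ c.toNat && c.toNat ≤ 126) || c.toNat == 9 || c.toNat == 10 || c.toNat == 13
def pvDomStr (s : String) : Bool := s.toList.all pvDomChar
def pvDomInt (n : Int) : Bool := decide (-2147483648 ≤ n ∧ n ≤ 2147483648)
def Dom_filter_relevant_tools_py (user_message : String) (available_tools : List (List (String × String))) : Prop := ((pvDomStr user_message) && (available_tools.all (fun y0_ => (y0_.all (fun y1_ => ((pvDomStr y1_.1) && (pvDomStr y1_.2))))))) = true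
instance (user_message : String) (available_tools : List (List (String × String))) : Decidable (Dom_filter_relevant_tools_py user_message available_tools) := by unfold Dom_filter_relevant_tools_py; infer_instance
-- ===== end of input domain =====

-- B flattens the message-activated keyword groups into one flat keyword list, then
-- computes a per-tool flag list and zip-selects the flagged tools, instead of A's
-- per-tool nested group loop with a mutable flag, break and overriding ifs.

-- ===== PORT A =====
-- the values of A's tool_keywords dict, in insertion order
def pvToolKeywordGroups : List (List String) :=
  [["suchen", "finden", "recherchieren", "search", "find"],
   ["berechnen", "rechnen", "calculate", "compute", "math"],
   ["datei", "file", "lesen", "read", "schreiben", "write"],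
   ["api", "daten", "data", "abrufen", "fetch"],
   ["analysieren", "analyze", "auswerten", "evaluate"]]

def filter_relevant_tools_py (user_message : String) (available_tools : List (List (String × String))) : List (List (String × String)) :=
  let user_message_lower := PySem.Str.lower user_message
  let relevant_tools := available_tools.foldl (fun relevant_tools tool =>
    let d := PySem.Dict.mk tool
    let tool_name := PySem.Str.lower (PySem.Dict.getD d "name" "")
    let tool_description := PySem.Str.lower (PySem.Dict.getD d "description" "")
    let tool_category := PySem.Str.lower (PySem.Dict.getD d "category" "")
    let is_relevant := false
    -- for keywords in tool_keywords.values(): if any(...) and any(...): is_relevant = True; break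
    let is_relevant :=
      if pvToolKeywordGroups.any (fun keywords =>
          keywords.any (fun keyword =>
            PySem.Str.isIn keyword tool_name || PySem.Str.isIn keyword tool_description)
          && keywords.any (fun keyword => PySem.Str.isIn keyword user_message_lower))
      then true else is_relevant
    let is_relevant := if PySem.Str.isIn tool_category user_message_lower then true else is_relevant
    let is_relevant := if PySem.Str.isIn tool_name user_message_lower then true else is_relevant
    if is_relevant then relevant_tools ++ [tool] else relevant_tools) []
  if relevant_tools.isEmpty then available_tools else relevant_tools

-- ===== PORT B =====
-- the per-tool flag of Source B's second stage
def pvFlagB (msg : String) (active_keywords : List String) (tool : List (String × String)) : Bool :=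
  let d := PySem.Dict.mk tool
  let name := PySem.Str.lower (PySem.Dict.getD d "name" "")
  let desc := PySem.Str.lower (PySem.Dict.getD d "description" "")
  let cat := PySem.Str.lower (PySem.Dict.getD d "category" "")
  active_keywords.any (fun k => PySem.Str.isIn k name || PySem.Str.isIn k desc)
    || PySem.Str.isIn cat msg
    || PySem.Str.isIn name msg

def filter_relevant_tools_py_alt (user_message : String) (available_tools : List (List (String × String))) : List (List (String × String)) :=
  let msg := PySem.Str.lower user_message
  -- Stage 1: flat list of the activated groups' keywords
  let active_keywords := (pvToolKeywordGroups.filter (fun group =>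
      group.any (fun w => PySem.Str.isIn w msg))).flatMap (fun group => group)
  -- Stage 2: one relevance flag per tool (flags.append(...))
  let flags := available_tools.foldl (fun flags tool => flags ++ [pvFlagB msg active_keywords tool]) []
  -- Stage 3: zip-select the flagged tools, with the fallback
  let relevant_tools := ((available_tools.zip flags).filter (fun p => p.2)).map (fun p => p.1)
  if relevant_tools.isEmpty then available_tools else relevant_tools

-- ===== PRECONDITION & SPEC =====
def Spec_filter_relevant_tools_py (user_message : String) (available_tools : List (List (String × String))) (out : List (List (String × String))) : Prop := out = filter_relevant_tools_py_alt user_message available_tools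
instance (user_message : String) (available_tools : List (List (String × String))) (out : List (List (String × String))) : Decidable (Spec_filter_relevant_tools_py user_message available_tools out) := by unfold Spec_filter_relevant_tools_py; infer_instance

-- ===== CLAIM (what is proved, stated in full; the proofs are below) =====
def Claim_equal_filter_relevant_tools_py : Prop := ∀ (user_message : String) (available_tools : List (List (String × String))), Dom_filter_relevant_tools_py user_message available_tools → Spec_filter_relevant_tools_py user_message available_tools (filter_relevant_tools_py user_message available_tools)

-- ===== LEMMAS AND PROOFS =====

-- dissolving the group structure: a grouped ∃g(match ∧ active) scan equals a flat
-- scan over the activated groups' flattened keywords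
theorem pvFlatten_groups (groups : List (List String)) (p q : String → Bool) :
    (groups.any fun g => g.any p && g.any q)
      = ((groups.filter (fun g => g.any q)).flatMap (fun g => g)).any p := by
  induction groups with
  | nil => rfl
  | cons g t ih =>
    simp only [List.any_cons, List.filter_cons]
    cases hq : g.any q
    · simp [ih]
    · simp [ih, List.any_append]

-- zip-selecting a list against its own flag map is a filter
theorem pvZip_flags_filter {α : Type} (l : List α) (f : α → Bool) :
    (((l.zip (l.map f)).filter (fun p => p.2)).map (fun p => p.1)) = l.filter f := by
  induction l with
  | nil => rfl
  | cons a t ih =>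
    simp only [List.map_cons, List.zip_cons_cons, List.filter_cons]
    cases h : f a <;> simp [ih]

-- A's per-tool flag/overriding-ifs boolean equals B's flag
theorem pvRel_eq (uml : String) (tool : List (String × String)) :
    (if PySem.Str.isIn (PySem.Str.lower (PySem.Dict.getD (PySem.Dict.mk tool) "name" "")) uml then true
     else if PySem.Str.isIn (PySem.Str.lower (PySem.Dict.getD (PySem.Dict.mk tool) "category" "")) uml then true
     else if pvToolKeywordGroups.any (fun keywords =>
         keywords.any (fun keyword =>
           PySem.Str.isIn keyword (PySem.Str.lower (PySem.Dict.getD (PySem.Dict.mk tool) "name" ""))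
           || PySem.Str.isIn keyword (PySem.Str.lower (PySem.Dict.getD (PySem.Dict.mk tool) "description" "")))
         && keywords.any (fun keyword => PySem.Str.isIn keyword uml))
       then true else false)
    = pvFlagB uml
        ((pvToolKeywordGroups.filter (fun group =>
          group.any (fun w => PySem.Str.isIn w uml))).flatMap (fun group => group)) tool := by
  simp only [pvFlagB]
  rw [← pvFlatten_groups]
  cases PySem.Str.isIn (PySem.Str.lower (PySem.Dict.getD (PySem.Dict.mk tool) "name" "")) uml <;>
  cases PySem.Str.isIn (PySem.Str.lower (PySem.Dict.getD (PySem.Dict.mk tool) "category" "")) uml <;>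
    simp [List.any_eq]

theorem filter_relevant_tools_py_eq_alt (um : String) (ats : List (List (String × String))) :
    filter_relevant_tools_py um ats = filter_relevant_tools_py_alt um ats := by
  simp only [filter_relevant_tools_py, filter_relevant_tools_py_alt,
    PySem.List.foldl_append_singleton_eq_map, List.nil_append, pvZip_flags_filter,
    ← pvRel_eq, PySem.List.foldl_append_if_eq_filter]

-- ===== VERDICT (by name: the statement is the Claim_ definition above) =====
theorem filter_relevant_tools_py_spec : Claim_equal_filter_relevant_tools_py := by
  intro um ats _
  exact filter_relevant_tools_py_eq_alt um ats
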